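-- pv_equiv track=rewrite | github.com/kartikwar/programming_practice | others/bulb_shines.py | solution
-- ===== SOURCE A (Python) =====
-- def solution(a):
--     count = 0
--     #missing previous bulbs that need to be encountered
--     missing = set()
--     #set of bulbs that were switched on, but didnt shine
--     store = set()
--
--     for i in range(len(a)):
--         if i+1 not in store:
--             if i +1 != a[i]:
--                 missing.add(i+1)
--         if i+1 < a[i]:
--             store.add(a[i])
--         else:
--             if a[i] in missing:
--                 missing.remove(a[i])
--
--         if len(missing) == 0:
--             count = count + 1
--
--     return count
-- ===== SOURCE B (Python) =====
-- def solution(a):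
--     seen = set()
--     m = 0
--     count = 0
--     for i, x in enumerate(a):
--         seen.add(x)
--         while m + 1 in seen:
--             m += 1
--         if m >= i + 1:
--             count += 1
--     return count
-- ===== Notes on version B (the rewrite author's own statement) =====
-- stated objective: simpler
-- what changed: Replaces A's two-set missing/store bookkeeping with a single seen-set plus a monotone frontier m = largest k with {1..k} all seen; a prefix counts when m reaches i+1.
import Mathlib
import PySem

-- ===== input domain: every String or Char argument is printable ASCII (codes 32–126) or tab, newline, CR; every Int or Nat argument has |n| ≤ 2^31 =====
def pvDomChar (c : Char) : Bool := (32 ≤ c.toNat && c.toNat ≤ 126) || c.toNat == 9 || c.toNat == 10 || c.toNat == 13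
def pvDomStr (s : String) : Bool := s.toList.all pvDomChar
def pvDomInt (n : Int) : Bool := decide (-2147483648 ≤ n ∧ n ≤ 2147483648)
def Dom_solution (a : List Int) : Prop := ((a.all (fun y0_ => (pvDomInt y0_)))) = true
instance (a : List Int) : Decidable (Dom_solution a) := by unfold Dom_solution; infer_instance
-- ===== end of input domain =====

-- B replaces A's two-set missing/store bookkeeping with one seen-set and a monotone
-- consecutive frontier m (largest k with 1..k all seen); simpler, same cost.

-- ===== PORT A =====
-- A's loop over range(len(a)), carrying (count, missing, store); i is the running index.
def solutionLoopA : List Int → Nat → Int → PySem.Set Int → PySem.Set Int → Int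
  | [], _, count, _, _ => count
  | x :: rest, i, count, missing, store =>
    let ip1 : Int := (i : Int) + 1
    -- if i+1 not in store: if i+1 != a[i]: missing.add(i+1)
    let missing1 :=
      if PySem.Set.contains store ip1 then missing
      else if ip1 ≠ x then PySem.Set.add missing ip1 else missing
    -- if i+1 < a[i]: store.add(a[i]) else: if a[i] in missing: missing.remove(a[i])
    let store' := if ip1 < x then PySem.Set.add store x else store
    let missing2 :=
      if ip1 < x then missing1
      else if PySem.Set.contains missing1 x then PySem.Set.discard missing1 x else missing1
    -- if len(missing) == 0: count += 1
    let count' := if missing2.length = 0 then count + 1 else count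
    solutionLoopA rest (i + 1) count' missing2 store'

def solution (a : List Int) : Int :=
  solutionLoopA a 0 0 PySem.Set.empty PySem.Set.empty

-- ===== PORT B =====
-- 'while m+1 in seen: m += 1' with fuel = |seen| (fuel only makes the loop total;
-- at most |seen| distinct values above m can be consumed, see solutionAdvance_spec).
def solutionAdvance (seen : PySem.Set Int) : Nat → Int → Int
  | 0, m => m
  | fuel + 1, m =>
    if PySem.Set.contains seen (m + 1) then solutionAdvance seen fuel (m + 1) else m

-- B's loop over enumerate(a), carrying (seen, m, count).
def solutionLoopB : List Int → Nat → PySem.Set Int → Int → Int → Int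
  | [], _, _, _, count => count
  | x :: rest, i, seen, m, count =>
    let seen' := PySem.Set.add seen x
    let m' := solutionAdvance seen' seen'.length m
    let count' := if m' ≥ (i : Int) + 1 then count + 1 else count
    solutionLoopB rest (i + 1) seen' m' count'

def solution_alt (a : List Int) : Int :=
  solutionLoopB a 0 PySem.Set.empty 0 0

-- ===== PRECONDITION & SPEC =====
def Spec_solution (a : List Int) (out : Int) : Prop := out = solution_alt a
instance (a : List Int) (out : Int) : Decidable (Spec_solution a out) := by unfold Spec_solution; infer_instance

-- ===== CLAIM (what is proved, stated in full; the proofs are below) =====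
def Claim_equal_solution : Prop := ∀ (a : List Int), Dom_solution a → Spec_solution a (solution a)

-- ===== LEMMAS AND PROOFS =====

-- counting integers above m splits into those above m+1 and the copies of m+1 itself
lemma solution_countP_split (l : List Int) (m : Int) :
    l.countP (fun v => decide (m < v)) =
      l.countP (fun v => decide (m + 1 < v)) + l.count (m + 1) := by
  induction l with
  | nil => simp
  | cons y l ih =>
    simp only [List.countP_cons, List.count_cons, ih]
    by_cases h1 : m < y <;> by_cases h2 : m + 1 < y <;> by_cases h3 : y = m + 1 <;>
      simp [h1, h2, h3] <;> omega

-- the while-loop, given enough fuel, reaches the frontier: every integer in (m, r]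
-- is in seen and r+1 is not
lemma solutionAdvance_spec (seen : PySem.Set Int) (fuel : Nat) (m : Int)
    (hfuel : (seen.filter (fun v => decide (m < v))).length ≤ fuel) :
    m ≤ solutionAdvance seen fuel m ∧
      (∀ k : Int, m < k → k ≤ solutionAdvance seen fuel m → k ∈ seen) ∧
      (solutionAdvance seen fuel m + 1) ∉ seen := by
  induction fuel generalizing m with
  | zero =>
    have hnot : (m + 1) ∉ seen := by
      intro hmem
      have : m + 1 ∈ seen.filter (fun v => decide (m < v)) := by
        simp [List.mem_filter, hmem]
      have := List.length_pos_of_mem this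
      omega
    refine ⟨le_refl _, ?_, ?_⟩
    · intro k h1 h2; simp only [solutionAdvance] at h2; omega
    · simpa only [solutionAdvance] using hnot
  | succ fuel ih =>
    by_cases hc : PySem.Set.contains seen (m + 1)
    · have hmem : (m + 1) ∈ seen := (PySem.Set.contains_iff _ _).mp hc
      have hlen : (seen.filter (fun v => decide (m + 1 < v))).length ≤ fuel := by
        have h1 := solution_countP_split seen m
        have h2 : 1 ≤ seen.count (m + 1) := List.count_pos_iff.mpr hmem
        rw [← List.countP_eq_length_filter] at hfuel ⊢
        omega
      have ⟨ih1, ih2, ih3⟩ := ih (m + 1) hlen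
      have heq : solutionAdvance seen (fuel + 1) m = solutionAdvance seen fuel (m + 1) := by
        simp only [solutionAdvance]; rw [if_pos hc]
      refine ⟨by omega, ?_, by rw [heq]; exact ih3⟩
      intro k h1 h2
      rw [heq] at h2
      by_cases hk : k = m + 1
      · exact hk ▸ hmem
      · exact ih2 k (by omega) h2
    · have heq : solutionAdvance seen (fuel + 1) m = m := by
        simp only [solutionAdvance]; rw [if_neg hc]
      refine ⟨by omega, ?_, ?_⟩
      · intro k h1 h2; rw [heq] at h2; omega
      · rw [heq]; intro hmem
        exact hc ((PySem.Set.contains_iff _ _).mpr hmem)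

-- the main invariant: A's (missing, store) and B's (seen, m) describe the same prefix
lemma solutionLoop_eq (rest : List Int) (i : Nat) (count : Int)
    (missing store seen : PySem.Set Int) (m : Int)
    (hmiss : ∀ v : Int, v ∈ missing ↔ (1 ≤ v ∧ v ≤ (i : Int) ∧ v ∉ seen))
    (hstore : ∀ v : Int, (i : Int) < v → (v ∈ store ↔ v ∈ seen))
    (hm0 : 0 ≤ m) (hmlo : ∀ k : Int, 1 ≤ k → k ≤ m → k ∈ seen) (hmhi : (m + 1) ∉ seen) :
    solutionLoopA rest i count missing store = solutionLoopB rest i seen m count := by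
  induction rest generalizing i count missing store seen m with
  | nil => rfl
  | cons x rest ih =>
    simp only [solutionLoopA, solutionLoopB]
    set ip1 : Int := (i : Int) + 1 with hip1
    set seen' := PySem.Set.add seen x with hseen'
    have hseenmem : ∀ v : Int, v ∈ seen' ↔ v ∈ seen ∨ v = x := fun v => PySem.Set.mem_add seen x v
    -- characterize missing1
    set missing1 :=
      if PySem.Set.contains store ip1 then missing
      else if ip1 ≠ x then PySem.Set.add missing ip1 else missing with hm1def
    have hstoreip1 : PySem.Set.contains store ip1 = true ↔ ip1 ∈ seen := by
      rw [PySem.Set.contains_iff]; exact hstore ip1 (by omega)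
    have hmiss1 : ∀ v : Int,
        v ∈ missing1 ↔ ((1 ≤ v ∧ v ≤ (i : Int) ∧ v ∉ seen) ∨ (v = ip1 ∧ ip1 ∉ seen ∧ ip1 ≠ x)) := by
      intro v
      rw [hm1def]
      by_cases hs : PySem.Set.contains store ip1
      · have : ip1 ∈ seen := hstoreip1.mp hs
        simp only [hs, if_true, hmiss v]
        tauto
      · have hnotseen : ip1 ∉ seen := fun h => hs (hstoreip1.mpr h)
        rw [if_neg hs]
        by_cases hne : ip1 ≠ x
        · rw [if_pos hne, PySem.Set.mem_add, hmiss v]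
          tauto
        · rw [if_neg hne, hmiss v]
          push_neg at hne
          tauto
    -- characterize missing2
    set missing2 :=
      if ip1 < x then missing1
      else if PySem.Set.contains missing1 x then PySem.Set.discard missing1 x else missing1
      with hm2def
    have hmiss2 : ∀ v : Int, v ∈ missing2 ↔ (1 ≤ v ∧ v ≤ ip1 ∧ v ∉ seen') := by
      intro v
      rw [hm2def]
      by_cases hlt : ip1 < x
      · simp only [hlt, if_true]
        rw [hmiss1 v, hseenmem v]
        constructor
        · rintro (⟨h1, h2, h3⟩ | ⟨h1, h2, h3⟩) <;> refine ⟨by omega, by omega, ?_⟩ <;> push_neg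
          · exact ⟨h3, by omega⟩
          · subst h1; exact ⟨h2, by omega⟩
        · rintro ⟨h1, h2, h3⟩
          push_neg at h3
          by_cases hv : v = ip1
          · exact Or.inr ⟨hv, hv ▸ h3.1, by omega⟩
          · exact Or.inl ⟨h1, by omega, h3.1⟩
      · have hmemc : v ∈ (if PySem.Set.contains missing1 x then PySem.Set.discard missing1 x
            else missing1) ↔ v ∈ missing1 ∧ v ≠ x := by
          by_cases hc : PySem.Set.contains missing1 x
          · simp only [hc, if_true]
            rw [PySem.Set.mem_discard]
          · have : x ∉ missing1 := fun h => hc ((PySem.Set.contains_iff _ _).mpr h)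
            simp only [hc, if_false, Bool.false_eq_true]
            constructor
            · intro h; exact ⟨h, fun he => this (he ▸ h)⟩
            · exact fun h => h.1
        simp only [hlt, if_false]
        rw [hmemc, hmiss1 v, hseenmem v]
        push_neg
        constructor
        · rintro ⟨(⟨h1, h2, h3⟩ | ⟨h1, h2, h3⟩), hne⟩
          · exact ⟨h1, by omega, h3, hne⟩
          · exact ⟨by omega, by omega, h1 ▸ h2, hne⟩
        · rintro ⟨h1, h2, h3, h4⟩
          by_cases hv : v = ip1
          · exact ⟨Or.inr ⟨hv, hv ▸ h3, fun he => h4 (hv.trans he)⟩, h4⟩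
          · exact ⟨Or.inl ⟨h1, by omega, h3⟩, h4⟩
    -- the advanced frontier
    set m' := solutionAdvance seen' seen'.length m with hm'def
    have hadv := solutionAdvance_spec seen' seen'.length m (List.length_filter_le _ _)
    rw [← hm'def] at hadv
    obtain ⟨hadv1, hadv2, hadv3⟩ := hadv
    have hmlo' : ∀ k : Int, 1 ≤ k → k ≤ m' → k ∈ seen' := by
      intro k h1 h2
      by_cases hk : k ≤ m
      · exact (hseenmem k).mpr (Or.inl (hmlo k h1 hk))
      · exact hadv2 k (by omega) h2
    -- the two count conditions agree
    have hcond : (missing2.length = 0) ↔ (m' ≥ ip1) := by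
      have hnil : missing2.length = 0 ↔ ∀ v : Int, v ∉ missing2 := by
        rw [List.length_eq_zero_iff, List.eq_nil_iff_forall_not_mem]
      rw [hnil]
      constructor
      · intro h
        by_contra hlt
        push_neg at hlt
        have : (m' + 1) ∈ missing2 :=
          (hmiss2 (m' + 1)).mpr ⟨by omega, by rw [hip1] at hlt ⊢; omega, hadv3⟩
        exact h (m' + 1) this
      · intro h v hv
        obtain ⟨h1, h2, h3⟩ := (hmiss2 v).mp hv
        exact h3 (hmlo' v h1 (by omega))
    -- apply the IH at i+1
    have hnext := ih (i + 1) (if m' ≥ ip1 then count + 1 else count) missing2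
      (if ip1 < x then PySem.Set.add store x else store) seen' m'
      (by
        intro v
        have hcast : ((i + 1 : Nat) : Int) = ip1 := by rw [hip1]; push_cast; ring
        rw [hcast]
        exact hmiss2 v)
      (by
        intro v hv
        push_cast at hv
        by_cases hlt : ip1 < x
        · simp only [hlt, if_true]
          rw [PySem.Set.mem_add, hseenmem v]
          have := hstore v (by omega)
          tauto
        · simp only [hlt, if_false]
          rw [hseenmem v]
          have hvx : v ≠ x := by omega
          have := hstore v (by omega)
          tauto)
      (by omega) hmlo'
      (by exact hadv3)
    simp only [hcond]
    exact hnext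

-- ===== VERDICT (by name: the statement is the Claim_ definition above) =====
theorem solution_spec : Claim_equal_solution := by
  intro a _
  show solution a = solution_alt a
  unfold solution solution_alt
  exact solutionLoop_eq a 0 0 PySem.Set.empty PySem.Set.empty PySem.Set.empty 0
    (by intro v; simp [PySem.Set.empty]; omega)
    (by intro v _; simp [PySem.Set.empty])
    (by omega)
    (by intro k h1 h2; omega)
    (by simp [PySem.Set.empty])
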